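-- pv_equiv track=rewrite | github.com/mythdorm/relations_classifications | relations.py | make_irreflexive
-- ===== SOURCE A (Python) =====
-- def check_reflexive(matrix):
--     reflexive = True
--
--     for row in range(len(matrix)):
--         # row_pos = matrix.index(row)
--         for col in range(len(matrix)):
--             # col_pos = row.index(col)
--             if row == col and not matrix[row][col] == 1:
--                 reflexive = False
--
--
--     return reflexive
--
-- def make_irreflexive(matrix):
--     missing_values = []
--     if not check_reflexive(matrix):
--         for row in range(len(matrix)):
--             for col in range(len(matrix)):
--                 if row == col and not matrix[row][col] == 0:
--                     missing_values.append([row, col])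
--
--     matrix_copy = matrix
--     for missing in missing_values:
--         matrix_copy[missing[0]][missing[1]] = 0
--
--     return matrix_copy
-- ===== SOURCE B (Python) =====
-- def make_irreflexive(matrix):
--     # Single O(n) diagonal pass: test reflexivity, then zero the diagonal.
--     # Like A, mutates `matrix` in place in the non-reflexive case.
--     if all(row[i] == 1 for i, row in enumerate(matrix)):
--         return matrix
--     for i, row in enumerate(matrix):
--         row[i] = 0
--     return matrix
-- ===== Notes on version B (the rewrite author's own statement) =====
-- stated objective: faster
-- what changed: Replaces A's two full O(n^2) nested scans (quadratic reflexivity check plus quadratic collection of a patch list that is then applied) with a single O(n) pass over the diagonal that tests reflexivity and then zeroes the diagonal in place.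
import Mathlib
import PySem

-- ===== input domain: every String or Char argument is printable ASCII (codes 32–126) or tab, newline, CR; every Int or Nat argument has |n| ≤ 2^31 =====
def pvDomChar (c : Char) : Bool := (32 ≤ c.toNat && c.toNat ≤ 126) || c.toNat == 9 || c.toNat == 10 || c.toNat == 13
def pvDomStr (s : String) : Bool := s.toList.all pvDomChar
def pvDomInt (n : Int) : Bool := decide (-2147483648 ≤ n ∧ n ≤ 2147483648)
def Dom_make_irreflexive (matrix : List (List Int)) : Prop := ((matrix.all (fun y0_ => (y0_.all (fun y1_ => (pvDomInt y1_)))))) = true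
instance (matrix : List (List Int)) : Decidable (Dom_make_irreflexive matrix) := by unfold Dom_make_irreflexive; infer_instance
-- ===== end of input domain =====

-- B replaces A's two O(n^2) full-matrix nested scans with one O(n) diagonal pass; both Pythons
-- mutate `matrix` in place identically, the theorems below are about the returned value.

-- ===== PORT A =====
def check_reflexive (matrix : List (List Int)) : Bool :=
  (PySem.List.pyRange 0 matrix.length).foldl (fun refl row =>
    (PySem.List.pyRange 0 matrix.length).foldl (fun refl col =>
      if row == col && !(PySem.List.pyGetD (PySem.List.pyGetD matrix row []) col 0 == 1)
      then false else refl) refl) true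

def make_irreflexive (matrix : List (List Int)) : List (List Int) :=
  let missing : List (Int × Int) :=
    if !(check_reflexive matrix) then
      (PySem.List.pyRange 0 matrix.length).foldl (fun acc row =>
        (PySem.List.pyRange 0 matrix.length).foldl (fun acc col =>
          if row == col && !(PySem.List.pyGetD (PySem.List.pyGetD matrix row []) col 0 == 0)
          then acc ++ [(row, col)] else acc) acc) []
    else []
  missing.foldl (fun m p =>
    PySem.List.pySetD m p.1 (PySem.List.pySetD (PySem.List.pyGetD m p.1 []) p.2 0)) matrix

-- ===== PORT B =====
def make_irreflexive_alt (matrix : List (List Int)) : List (List Int) :=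
  if (PySem.List.enumerate matrix).all (fun p => PySem.List.pyGetD p.2 p.1 0 == 1) then matrix
  else (PySem.List.enumerate matrix).map (fun p => PySem.List.pySetD p.2 p.1 0)

-- ===== PRECONDITION & SPEC =====
-- Python A reads matrix[i][i] for every i < len(matrix); it raises IndexError iff some row i
-- is shorter than i+1. Pre_ admits exactly the inputs where every diagonal entry exists.
def Pre_make_irreflexive (matrix : List (List Int)) : Prop :=
  ∀ i ∈ List.range matrix.length, i < (matrix.getD i []).length
instance (matrix : List (List Int)) : Decidable (Pre_make_irreflexive matrix) := by
  unfold Pre_make_irreflexive; infer_instance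

def pvWitness_make_irreflexive : List (List Int) := [[1, 2], [3, 0]]

def Spec_make_irreflexive (matrix : List (List Int)) (out : List (List Int)) : Prop := out = make_irreflexive_alt matrix
instance (matrix : List (List Int)) (out : List (List Int)) : Decidable (Spec_make_irreflexive matrix out) := by unfold Spec_make_irreflexive; infer_instance

-- ===== CLAIM (what is proved, stated in full; the proofs are below) =====
def Claim_equal_make_irreflexive : Prop := ∀ (matrix : List (List Int)), Dom_make_irreflexive matrix → Pre_make_irreflexive matrix → Spec_make_irreflexive matrix (make_irreflexive matrix)

-- ===== LEMMAS AND PROOFS =====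

-- a latch that can only switch the accumulator to false
lemma foldl_latch {α : Type} (p : α → Bool) (l : List α) (b : Bool) :
    l.foldl (fun r c => if p c then false else r) b = (b && !(l.any p)) := by
  induction l generalizing b with
  | nil => simp
  | cons h t ih =>
    rw [List.foldl_cons, ih]
    cases hp : p h <;> simp [hp]

lemma foldl_and {α : Type} (f : α → Bool) (l : List α) (b : Bool) :
    l.foldl (fun r x => r && f x) b = (b && l.all f) := by
  induction l generalizing b with
  | nil => simp
  | cons h t ih => simp [List.foldl_cons, ih, Bool.and_assoc]

lemma any_range_eq (n row : Int) (h0 : 0 ≤ row) (h1 : row < n) (q : Int → Bool) :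
    (PySem.List.pyRange 0 n).any (fun c => (row == c) && q c) = q row := by
  cases hq : q row with
  | true =>
    apply List.any_eq_true.mpr
    exact ⟨row, PySem.List.mem_pyRange_one.mpr ⟨h0, h1⟩, by simp [hq]⟩
  | false =>
    apply List.any_eq_false.mpr
    intro c _
    simp only [Bool.and_eq_true, beq_iff_eq, not_and]
    intro hc; subst hc; simp [hq]

lemma filter_beq_and (l : List Int) (hl : l.Nodup) (r : Int) (hr : r ∈ l) (q : Int → Bool) :
    l.filter (fun c => (r == c) && q c) = if q r then [r] else [] := by
  induction l with
  | nil => cases hr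
  | cons a t ih =>
    rcases List.mem_cons.mp hr with h | h
    · subst h
      have htr : r ∉ t := (List.nodup_cons.mp hl).1
      have ht : t.filter (fun c => (r == c) && q c) = [] := by
        apply List.filter_eq_nil_iff.mpr
        intro c hc
        simp only [Bool.and_eq_true, beq_iff_eq, not_and]
        intro hrc; exact absurd (hrc ▸ hc) htr
      cases hq : q r <;> simp [hq, ht]
    · have har : r ≠ a := by
        rintro rfl; exact (List.nodup_cons.mp hl).1 h
      simp only [List.filter_cons]
      rw [ih (List.nodup_cons.mp hl).2 h]
      simp [har]

lemma check_eq (matrix : List (List Int)) :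
    check_reflexive matrix =
      (PySem.List.pyRange 0 matrix.length).all
        (fun i => PySem.List.pyGetD (PySem.List.pyGetD matrix i []) i 0 == 1) := by
  unfold check_reflexive
  rw [PySem.List.foldl_congr_mem _ _
      (fun refl row => refl && (PySem.List.pyGetD (PySem.List.pyGetD matrix row []) row 0 == 1))
      true ?_]
  · rw [foldl_and]; simp
  · intro acc row hrow
    obtain ⟨h0, h1⟩ := PySem.List.mem_pyRange_one.mp hrow
    rw [foldl_latch, any_range_eq _ _ h0 h1]
    simp

lemma enumerate_getElem? {α : Type} (xs : List α) (s : Int) (j : Nat) :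
    (PySem.List.enumerate xs s)[j]? = xs[j]?.map (fun x => (s + j, x)) := by
  induction xs generalizing s j with
  | nil => simp [PySem.List.enumerate]
  | cons x t ih =>
    cases j with
    | zero => simp [PySem.List.enumerate]
    | succ j =>
      simp only [PySem.List.enumerate, List.getElem?_cons_succ, ih]
      cases t[j]? with
      | none => simp
      | some x => simp; omega

lemma check_iff (matrix : List (List Int)) :
    (PySem.List.enumerate matrix).all (fun p => PySem.List.pyGetD p.2 p.1 0 == 1) =
      check_reflexive matrix := by
  rw [check_eq, PySem.List.pyRange_zero_natCast, List.all_map, Bool.eq_iff_iff]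
  simp only [List.all_eq_true]
  constructor
  · intro h k hk
    have hk' : k < matrix.length := List.mem_range.mp hk
    have hmem : ((k : Int), matrix[k]) ∈ PySem.List.enumerate matrix := by
      apply List.mem_iff_getElem?.mpr
      refine ⟨k, ?_⟩
      rw [enumerate_getElem?]
      simp [List.getElem?_eq_getElem hk']
    have := h _ hmem
    simpa [PySem.List.pyGetD_natCast, List.getD_eq_getElem?_getD, hk'] using this
  · intro h p hp
    obtain ⟨j, hj⟩ := List.mem_iff_getElem?.mp hp
    rw [enumerate_getElem?] at hj
    cases hjm : matrix[j]? with
    | none => simp [hjm] at hj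
    | some row =>
      have hjl : j < matrix.length := by
        by_contra hc
        rw [List.getElem?_eq_none (by omega)] at hjm; cases hjm
      simp only [hjm, Option.map_some] at hj
      have := h j (List.mem_range.mpr hjl)
      cases hj
      simpa [PySem.List.pyGetD_natCast, List.getD_eq_getElem?_getD, hjm] using this

lemma flatMap_ite {α β : Type} (p : α → Bool) (f : α → β) (l : List α) :
    l.flatMap (fun a => if p a then [f a] else []) = (l.filter p).map f := by
  induction l with
  | nil => simp
  | cons a t ih => cases hp : p a <;> simp [hp, ih]

lemma foldl_set_diag_getElem? (l : List Nat) (m : List (List Int)) (j : Nat) :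
    (l.foldl (fun m k => m.set k ((m.getD k []).set k 0)) m)[j]? =
      if j ∈ l then m[j]?.map (fun row => row.set j 0) else m[j]? := by
  induction l generalizing m with
  | nil => simp
  | cons k t ih =>
    simp only [List.foldl_cons, ih, List.mem_cons]
    by_cases hkm : k < m.length
    · have hget : ∀ i : Nat, (m.set k ((m.getD k []).set k 0))[i]? =
          if i = k then m[i]?.map (fun row => row.set i 0) else m[i]? := by
        intro i
        rw [List.getElem?_set]
        by_cases hik : k = i
        · subst hik
          simp [hkm, List.getD_eq_getElem?_getD]
        · rw [if_neg hik, if_neg (fun h : i = k => hik h.symm)]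
      by_cases hjt : j ∈ t
      · simp only [hjt, if_true, or_true, hget]
        by_cases hjk : j = k
        · subst hjk
          cases m[j]? <;> simp [List.set_set]
        · simp [hjk]
      · simp only [hjt, if_false, or_false, hget]
    · have hset : m.set k ((m.getD k []).set k 0) = m :=
        List.set_eq_of_length_le (le_of_not_gt hkm)
      rw [hset]
      by_cases hjt : j ∈ t
      · simp [hjt]
      · by_cases hjk : j = k
        · subst hjk
          have : m[j]? = none := List.getElem?_eq_none (le_of_not_gt hkm)
          simp [this, hjt]
        · simp [hjk, hjt]

lemma set_self_of_zero (row : List Int) (j : Nat) (h : row[j]?.getD 0 = 0) :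
    row.set j 0 = row := by
  apply List.ext_getElem?
  intro i
  rw [List.getElem?_set]
  by_cases hij : j = i
  · subst hij
    by_cases hjl : j < row.length
    · rw [if_pos rfl, if_pos hjl, List.getElem?_eq_getElem hjl]
      rw [List.getElem?_eq_getElem hjl] at h
      simp only [Option.getD_some] at h
      simp [h]
    · rw [if_pos rfl, if_neg hjl, List.getElem?_eq_none (le_of_not_gt hjl)]
  · simp [hij]

-- ===== VERDICT (by name: the statement is the Claim_ definition above) =====
theorem make_irreflexive_spec : Claim_equal_make_irreflexive := by
  intro matrix _ hpre
  unfold Spec_make_irreflexive make_irreflexive make_irreflexive_alt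
  rw [check_iff]
  cases hc : check_reflexive matrix with
  | true => simp
  | false =>
    simp only [Bool.not_false, if_true, if_false, Bool.false_eq_true]
    -- A's missing list in closed form
    rw [PySem.List.foldl_congr_mem _ _
        (fun acc row => acc ++
          (if !(PySem.List.pyGetD (PySem.List.pyGetD matrix row []) row 0 == 0)
           then [(row, row)] else [])) [] ?_]
    · rw [PySem.List.foldl_append_eq_flatMap, List.nil_append, flatMap_ite,
          PySem.List.pyRange_zero_natCast, List.filter_map, List.map_map, List.foldl_map]
      rw [PySem.List.foldl_congr_mem _ _
          (fun m k => m.set k ((m.getD k []).set k 0)) matrix ?_]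
      · apply List.ext_getElem?
        intro j
        rw [foldl_set_diag_getElem?]
        have hB : (List.map (fun p => PySem.List.pySetD p.2 p.1 0)
            (PySem.List.enumerate matrix))[j]? = matrix[j]?.map (fun row => row.set j 0) := by
          rw [List.getElem?_map, enumerate_getElem?]
          cases matrix[j]? <;> simp [PySem.List.pySetD_natCast]
        rw [hB]
        by_cases hmem : j ∈ List.filter
            ((fun row => !(PySem.List.pyGetD (PySem.List.pyGetD matrix row []) row 0 == 0)) ∘
              (fun k : Nat => (k : Int)))
            (List.range matrix.length)
        · rw [if_pos hmem]
        · rw [if_neg hmem]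
          by_cases hjl : j < matrix.length
          · have hq : (!(PySem.List.pyGetD (PySem.List.pyGetD matrix (j : Int) [])
                (j : Int) 0 == 0)) = false := by
              cases hb : (!(PySem.List.pyGetD (PySem.List.pyGetD matrix (j : Int) [])
                  (j : Int) 0 == 0)) with
              | false => rfl
              | true =>
                exact absurd (List.mem_filter.mpr
                  ⟨List.mem_range.mpr hjl, by simpa [Function.comp] using hb⟩) hmem
            have hz : (matrix.getD j []).getD j 0 = 0 := by
              simpa [PySem.List.pyGetD_natCast] using hq
            have hrow : matrix.getD j [] = matrix[j] := by
              simp [List.getD_eq_getElem?_getD, List.getElem?_eq_getElem hjl]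
            rw [hrow, List.getD_eq_getElem?_getD] at hz
            rw [List.getElem?_eq_getElem hjl]
            simp [set_self_of_zero _ _ hz]
          · simp [List.getElem?_eq_none (le_of_not_gt hjl)]
      · intro acc k hk
        simp [Function.comp, PySem.List.pySetD_natCast, PySem.List.pyGetD_natCast]
    · intro acc row hrow
      obtain ⟨h0, h1⟩ := PySem.List.mem_pyRange_one.mp hrow
      rw [PySem.List.foldl_append_if
          (fun col => row == col && !(PySem.List.pyGetD (PySem.List.pyGetD matrix row []) col 0 == 0))
          (fun col => (row, col))]
      rw [filter_beq_and _ ?nd row (PySem.List.mem_pyRange_one.mpr ⟨h0, h1⟩)]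
      case nd =>
        rw [PySem.List.pyRange_zero_natCast]
        exact List.nodup_range.map (fun a b h => by exact_mod_cast h)
      cases hq : !(PySem.List.pyGetD (PySem.List.pyGetD matrix row []) row 0 == 0) <;> simp [hq]
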